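-- pv_equiv track=rewrite | github.com/netceteragroup/Flatland-Challenge | envs/flatland/observations/segment_graph.py | find_equal_starting_points
-- ===== SOURCE A (Python) =====
-- def find_equal_starting_points(list_agents):
--     equal_start = []
--     for i in range(len(list_agents)):
--         for j in range(len(list_agents)):
--             agent1, agent2 = list_agents[i][0], list_agents[j][0]
--             dist1, dist2 = list_agents[i][1], list_agents[j][1]
--             if agent1 != agent2 and dist1 == dist2 and dist1 != 0 and dist2 != 0:
--                 equal_start.append((agent1, agent2))
--     return equal_start
-- ===== SOURCE B (Python) =====
-- def find_equal_starting_points(list_agents):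
--     # One pass groups agents by their (nonzero) distance, a second pass emits,
--     # for each agent, the pairs with every other agent of the same distance.
--     groups = {}
--     for agent, dist in list_agents:
--         if dist != 0:
--             groups.setdefault(dist, []).append(agent)
--     result = []
--     for agent, dist in list_agents:
--         if dist != 0:
--             result.extend((agent, other) for other in groups[dist] if other != agent)
--     return result
-- ===== Notes on version B (the rewrite author's own statement) =====
-- stated objective: faster
-- what changed: Replaces the quadratic all-pairs double scan by a dict that groups agents by nonzero distance in one pass, then a second pass emits each agent's pairs from its own group only.
import Mathlib
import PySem

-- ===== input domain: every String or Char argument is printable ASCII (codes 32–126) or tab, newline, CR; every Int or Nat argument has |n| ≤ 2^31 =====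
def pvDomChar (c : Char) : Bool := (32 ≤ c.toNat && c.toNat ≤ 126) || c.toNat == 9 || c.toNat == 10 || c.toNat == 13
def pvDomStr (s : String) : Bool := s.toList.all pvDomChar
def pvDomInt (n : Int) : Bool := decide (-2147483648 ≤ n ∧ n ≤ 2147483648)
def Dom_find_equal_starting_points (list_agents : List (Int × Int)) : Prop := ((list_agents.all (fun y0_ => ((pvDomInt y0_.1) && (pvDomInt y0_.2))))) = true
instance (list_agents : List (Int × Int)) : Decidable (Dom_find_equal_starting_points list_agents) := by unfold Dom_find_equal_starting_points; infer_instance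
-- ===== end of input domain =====

-- B replaces A's quadratic all-pairs scan by a one-pass dict grouping agents by
-- nonzero distance plus a second pass emitting pairs per group (faster, asymptotic).

-- ===== PORT A =====
def find_equal_starting_points (list_agents : List (Int × Int)) : List (Int × Int) :=
  (PySem.List.pyRange 0 (list_agents.length : Int) 1).foldl (fun equal_start i =>
    (PySem.List.pyRange 0 (list_agents.length : Int) 1).foldl (fun equal_start j =>
      let agent1 := (PySem.List.pyGetD list_agents i (0, 0)).1
      let agent2 := (PySem.List.pyGetD list_agents j (0, 0)).1
      let dist1 := (PySem.List.pyGetD list_agents i (0, 0)).2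
      let dist2 := (PySem.List.pyGetD list_agents j (0, 0)).2
      if agent1 ≠ agent2 ∧ dist1 = dist2 ∧ dist1 ≠ 0 ∧ dist2 ≠ 0 then
        equal_start ++ [(agent1, agent2)]
      else equal_start) equal_start) []

-- ===== PORT B =====
def fespGroups (list_agents : List (Int × Int)) : PySem.Dict Int (List Int) :=
  list_agents.foldl (fun groups p =>
    if p.2 ≠ 0 then groups.modify p.2 [] (· ++ [p.1]) else groups) PySem.Dict.empty

def find_equal_starting_points_alt (list_agents : List (Int × Int)) : List (Int × Int) :=
  let groups := fespGroups list_agents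
  list_agents.foldl (fun result p =>
    if p.2 ≠ 0 then
      result ++ ((groups.getD p.2 []).filter (fun other => other ≠ p.1)).map (fun other => (p.1, other))
    else result) []

-- ===== PRECONDITION & SPEC =====
def Spec_find_equal_starting_points (list_agents : List (Int × Int)) (out : List (Int × Int)) : Prop := out = find_equal_starting_points_alt list_agents
instance (list_agents : List (Int × Int)) (out : List (Int × Int)) : Decidable (Spec_find_equal_starting_points list_agents out) := by unfold Spec_find_equal_starting_points; infer_instance

-- ===== CLAIM (what is proved, stated in full; the proofs are below) =====
def Claim_equal_find_equal_starting_points : Prop := ∀ (list_agents : List (Int × Int)), Dom_find_equal_starting_points list_agents → Spec_find_equal_starting_points list_agents (find_equal_starting_points list_agents)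

-- ===== LEMMAS AND PROOFS =====

-- the grouping dict holds, under each nonzero distance v, the agents at distance v in order
theorem fespGroups_getD (xs : List (Int × Int)) (d : PySem.Dict Int (List Int)) (v : Int) :
    (xs.foldl (fun groups p => if p.2 ≠ 0 then groups.modify p.2 [] (· ++ [p.1]) else groups) d).getD v [] =
      d.getD v [] ++ (xs.filter (fun q => decide (q.2 = v) && decide (q.2 ≠ 0))).map Prod.fst := by
  induction xs generalizing d with
  | nil => simp
  | cons p xs ih =>
    simp only [List.foldl_cons, List.filter_cons]
    by_cases h0 : p.2 ≠ 0
    · rw [if_pos h0, ih]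
      by_cases hv : p.2 = v
      · subst hv
        simp [h0, PySem.Dict.getD_modify_self]
      · simp [hv, PySem.Dict.getD_modify, Ne.symm hv]
    · rw [if_neg h0, ih]
      have h0' : p.2 = 0 := not_not.mp h0
      simp [h0']

theorem fesp_inner (xs : List (Int × Int)) (p : Int × Int) :
    ((fespGroups xs).getD p.2 []).filter (fun other => other ≠ p.1) =
      (xs.filter (fun q => decide (p.1 ≠ q.1 ∧ p.2 = q.2 ∧ p.2 ≠ 0 ∧ q.2 ≠ 0))).map Prod.fst := by
  unfold fespGroups
  rw [fespGroups_getD]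
  simp only [PySem.Dict.getD_empty, List.nil_append, List.filter_map, List.filter_filter]
  congr 1
  apply List.filter_congr
  intro q hq
  simp [Function.comp]
  rcases q with ⟨qa, qd⟩
  by_cases h1 : qd = p.2 <;> by_cases h2 : qd = 0 <;> by_cases h3 : qa = p.1 <;>
    simp [h1, h2, h3] <;> omega

theorem fesp_gA_eq_gB (xs : List (Int × Int)) (p : Int × Int) :
    (xs.filter (fun q => decide (p.1 ≠ q.1 ∧ p.2 = q.2 ∧ p.2 ≠ 0 ∧ q.2 ≠ 0))).map (fun q => (p.1, q.1)) =
      if p.2 ≠ 0 then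
        (((fespGroups xs).getD p.2 []).filter (fun other => other ≠ p.1)).map (fun other => (p.1, other))
      else [] := by
  by_cases h0 : p.2 = 0
  · simp [h0]
  · rw [if_pos h0, fesp_inner, List.map_map]
    rfl

theorem fesp_ite_append (acc h : List (Int × Int)) (c : Prop) [Decidable c] :
    (if c then acc ++ h else acc) = acc ++ (if c then h else []) := by
  split <;> simp

theorem fesp_inner_loop (xs : List (Int × Int)) (p : Int × Int) (acc : List (Int × Int)) :
    (PySem.List.pyRange 0 (xs.length : Int) 1).foldl (fun equal_start j =>
        if p.1 ≠ (PySem.List.pyGetD xs j (0, 0)).1 ∧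
            p.2 = (PySem.List.pyGetD xs j (0, 0)).2 ∧
            p.2 ≠ 0 ∧ (PySem.List.pyGetD xs j (0, 0)).2 ≠ 0 then
          equal_start ++ [(p.1, (PySem.List.pyGetD xs j (0, 0)).1)]
        else equal_start) acc =
      acc ++ (xs.filter (fun q => decide (p.1 ≠ q.1 ∧ p.2 = q.2 ∧ p.2 ≠ 0 ∧ q.2 ≠ 0))).map (fun q => (p.1, q.1)) := by
  rw [PySem.List.foldl_pyRange_zero_pyGetD' xs (0, 0)
    (fun equal_start q => if p.1 ≠ q.1 ∧ p.2 = q.2 ∧ p.2 ≠ 0 ∧ q.2 ≠ 0 then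
      equal_start ++ [(p.1, q.1)] else equal_start) acc]
  exact PySem.List.foldl_append_ite _ _ _ _

theorem find_equal_starting_points_spec : Claim_equal_find_equal_starting_points := by
  intro xs _
  show find_equal_starting_points xs = find_equal_starting_points_alt xs
  unfold find_equal_starting_points find_equal_starting_points_alt
  show (PySem.List.pyRange 0 (xs.length : Int) 1).foldl (fun equal_start i =>
      (PySem.List.pyRange 0 (xs.length : Int) 1).foldl (fun equal_start j =>
        if (PySem.List.pyGetD xs i (0, 0)).1 ≠ (PySem.List.pyGetD xs j (0, 0)).1 ∧
            (PySem.List.pyGetD xs i (0, 0)).2 = (PySem.List.pyGetD xs j (0, 0)).2 ∧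
            (PySem.List.pyGetD xs i (0, 0)).2 ≠ 0 ∧ (PySem.List.pyGetD xs j (0, 0)).2 ≠ 0 then
          equal_start ++ [((PySem.List.pyGetD xs i (0, 0)).1, (PySem.List.pyGetD xs j (0, 0)).1)]
        else equal_start) equal_start) [] = _
  rw [PySem.List.foldl_pyRange_zero_pyGetD' xs (0, 0)
    (fun equal_start p => (PySem.List.pyRange 0 (xs.length : Int) 1).foldl (fun equal_start j =>
        if p.1 ≠ (PySem.List.pyGetD xs j (0, 0)).1 ∧
            p.2 = (PySem.List.pyGetD xs j (0, 0)).2 ∧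
            p.2 ≠ 0 ∧ (PySem.List.pyGetD xs j (0, 0)).2 ≠ 0 then
          equal_start ++ [(p.1, (PySem.List.pyGetD xs j (0, 0)).1)]
        else equal_start) equal_start) []]
  simp only [fesp_inner_loop]
  simp only [fesp_ite_append, PySem.List.foldl_append_eq_flatMap, List.nil_append]
  exact congrArg (fun g => xs.flatMap g) (funext (fesp_gA_eq_gB xs))
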